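-- pv_equiv track=rewrite | github.com/tirtha-v/LLMap | icl_eval.py | extract_label_from_output
-- ===== SOURCE A (Python) =====
-- from typing import List, Dict
--
-- def extract_label_from_output(
--     output_text: str,
--     label_list: List[str],
-- ) -> str:
--     """
--     Simple heuristic: find the first label that appears in the output text,
--     or fall back to the first token / best fuzzy match.
--     """
--     text_lower = output_text.strip().lower()
--
--     # exact match on whole output
--     for lab in label_list:
--         if text_lower == lab.lower():
--             return lab
--
--     # substring search in the output
--     for lab in label_list:
--         if lab.lower() in text_lower:
--             return lab
--
--     # fallback: take first word and match to closest label by exact prefix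
--     first_token = text_lower.split()[0]
--     for lab in label_list:
--         if lab.lower().startswith(first_token):
--             return lab
--
--     # last resort: return a dummy label (will be counted as wrong)
--     return label_list[0]
-- ===== SOURCE B (Python) =====
-- def extract_label_from_output(
--     output_text: str,
--     label_list,
-- ) -> str:
--     # Score-and-select: compute a rank for every label (0 exact, 1 substring,
--     # 2 prefix-of-first-token, 3 no match) and return the label minimizing
--     # (rank, position); fall back to label_list[0] when nothing matches.
--     text_lower = output_text.strip().lower()
--     toks = text_lower.split()
--     first_token = toks[0] if toks else ""
--
--     def rank(lab):
--         low = lab.lower()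
--         if low == text_lower:
--             return 0
--         if low in text_lower:
--             return 1
--         if low.startswith(first_token):
--             return 2
--         return 3
--
--     best = min(range(len(label_list)), key=lambda i: (rank(label_list[i]), i))
--     return label_list[best] if rank(label_list[best]) < 3 else label_list[0]
-- ===== Notes on version B (the rewrite author's own statement) =====
-- stated objective: alternative
-- what changed: Replaces A's three sequential early-returning scans (exact, then substring, then prefix) by a score-and-select algorithm: every label is assigned a match rank (0 exact, 1 substring, 2 prefix, 3 none) and the result is the label minimizing (rank, position) via a single min() over indices, with label_list[0] when the best rank is 3.
import Mathlib
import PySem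

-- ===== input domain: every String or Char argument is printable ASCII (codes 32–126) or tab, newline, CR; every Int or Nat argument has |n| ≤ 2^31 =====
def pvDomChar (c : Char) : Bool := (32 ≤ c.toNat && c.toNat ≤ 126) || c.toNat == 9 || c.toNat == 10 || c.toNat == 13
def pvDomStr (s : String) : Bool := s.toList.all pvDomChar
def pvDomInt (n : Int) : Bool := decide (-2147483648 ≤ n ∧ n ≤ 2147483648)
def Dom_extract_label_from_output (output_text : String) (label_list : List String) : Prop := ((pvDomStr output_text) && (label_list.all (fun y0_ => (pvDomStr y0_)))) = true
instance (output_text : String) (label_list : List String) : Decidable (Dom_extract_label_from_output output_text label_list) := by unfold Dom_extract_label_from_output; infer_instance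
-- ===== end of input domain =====

-- B replaces A's three staged early-return scans by a score-and-select algorithm:
-- rank every label (0 exact, 1 substring, 2 prefix, 3 none) and pick the label
-- minimizing (rank, position) — an alternative decomposition, same cost.
-- ===== PORT A =====
-- first label whose lowercase equals t (A's first loop)
def pvA_exact (t : String) : List String → Option String
  | [] => none
  | l :: ls => if t = PySem.Str.lower l then some l else pvA_exact t ls

-- first label whose lowercase is a substring of t (A's second loop)
def pvA_sub (t : String) : List String → Option String
  | [] => none
  | l :: ls => if PySem.Str.isIn (PySem.Str.lower l) t then some l else pvA_sub t ls

-- first label whose lowercase starts with ft (A's third loop)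
def pvA_pref (ft : String) : List String → Option String
  | [] => none
  | l :: ls => if PySem.Str.startswith (PySem.Str.lower l) ft then some l else pvA_pref ft ls

def extract_label_from_output (output_text : String) (label_list : List String) : String :=
  -- text_lower = output_text.strip().lower()
  match pvA_exact (PySem.Str.lower (PySem.Str.strip output_text)) label_list with
  | some lab => lab
  | none =>
    match pvA_sub (PySem.Str.lower (PySem.Str.strip output_text)) label_list with
    | some lab => lab
    | none =>
      -- first_token = text_lower.split()[0]: IndexError on an empty token list, excluded by Pre_
      match pvA_pref ((PySem.Str.split₀ (PySem.Str.lower (PySem.Str.strip output_text))).headD "") label_list with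
      | some lab => lab
      | none => (PySem.List.pyGet? label_list 0).getD ""  -- label_list[0]; IndexError excluded by Pre_

-- ===== PORT B =====
-- B's rank of a label: 0 exact match, 1 substring, 2 first-token prefix, 3 no match
def pvRank (t ft lab : String) : Nat :=
  if PySem.Str.lower lab = t then 0
  else if PySem.Str.isIn (PySem.Str.lower lab) t then 1
  else if PySem.Str.startswith (PySem.Str.lower lab) ft then 2
  else 3

-- Python's lexicographic comparison of (Nat, Nat) key tuples
def pvTupLt (a b : Nat × Nat) : Bool := a.1 < b.1 || (a.1 == b.1 && a.2 < b.2)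

-- Python min(xs, key=…): left fold keeping the first element with strictly smallest key
def pvMinIdx (key : Nat → Nat × Nat) (xs : List Nat) : Option Nat :=
  xs.foldl (fun acc i =>
    match acc with
    | none => some i
    | some j => if pvTupLt (key i) (key j) then some i else some j) none

-- label_list[i] for 0 ≤ i < len
def pvGetL (ll : List String) (i : Nat) : String := (PySem.List.pyGet? ll (i : Int)).getD ""

def extract_label_from_output_alt (output_text : String) (label_list : List String) : String :=
  -- t = output_text.strip().lower(); ft = toks[0] if toks else ""
  match pvMinIdx (fun i => (pvRank (PySem.Str.lower (PySem.Str.strip output_text))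
      ((PySem.Str.split₀ (PySem.Str.lower (PySem.Str.strip output_text))).headD "")
      (pvGetL label_list i), i)) (List.range label_list.length) with
  | none => pvGetL label_list 0   -- min() over an empty range: ValueError, excluded by Pre_
  | some i =>
    if pvRank (PySem.Str.lower (PySem.Str.strip output_text))
        ((PySem.Str.split₀ (PySem.Str.lower (PySem.Str.strip output_text))).headD "")
        (pvGetL label_list i) < 3
    then pvGetL label_list i else pvGetL label_list 0

-- ===== PRECONDITION & SPEC =====
-- A raises IndexError exactly when label_list is empty, or when the stripped text is
-- empty and no label is the empty string (then split()[0] has no token); Pre_ excludes exactly those.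
def Pre_extract_label_from_output (output_text : String) (label_list : List String) : Prop :=
  label_list ≠ [] ∧ (PySem.Str.strip output_text ≠ "" ∨ "" ∈ label_list)
instance (output_text : String) (label_list : List String) : Decidable (Pre_extract_label_from_output output_text label_list) := by unfold Pre_extract_label_from_output; infer_instance

def pvWitness_extract_label_from_output : String × List String := ("The Cat.", ["dog", "cat"])

def Spec_extract_label_from_output (output_text : String) (label_list : List String) (out : String) : Prop := out = extract_label_from_output_alt output_text label_list
instance (output_text : String) (label_list : List String) (out : String) : Decidable (Spec_extract_label_from_output output_text label_list out) := by unfold Spec_extract_label_from_output; infer_instance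

-- ===== CLAIM (what is proved, stated in full; the proofs are below) =====
def Claim_equal_extract_label_from_output : Prop := ∀ (output_text : String) (label_list : List String), Dom_extract_label_from_output output_text label_list → Pre_extract_label_from_output output_text label_list → Spec_extract_label_from_output output_text label_list (extract_label_from_output output_text label_list)
-- ===== LEMMAS AND PROOFS =====

-- A's scans are List.find? with the corresponding predicate
lemma pvA_exact_eq (t : String) (ll : List String) :
    pvA_exact t ll = ll.find? (fun l => t = PySem.Str.lower l) := by
  induction ll with
  | nil => rfl
  | cons l ls ih => rw [pvA_exact, List.find?_cons, ih]; split_ifs with h <;> simp [h]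

lemma pvA_sub_eq (t : String) (ll : List String) :
    pvA_sub t ll = ll.find? (fun l => PySem.Str.isIn (PySem.Str.lower l) t) := by
  induction ll with
  | nil => rfl
  | cons l ls ih =>
    rw [pvA_sub]
    split_ifs with h
    · rw [List.find?_cons_of_pos (by exact h)]
    · rw [List.find?_cons_of_neg (by simpa using h), ih]

lemma pvA_pref_eq (ft : String) (ll : List String) :
    pvA_pref ft ll = ll.find? (fun l => PySem.Str.startswith (PySem.Str.lower l) ft) := by
  induction ll with
  | nil => rfl
  | cons l ls ih =>
    rw [pvA_pref]
    split_ifs with h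
    · rw [List.find?_cons_of_pos (by exact h)]
    · rw [List.find?_cons_of_neg (by simpa using h), ih]

lemma pvGetL_cons_succ (x : String) (xs : List String) (i : Nat) :
    pvGetL (x :: xs) (i + 1) = pvGetL xs i := by
  simp [pvGetL]

-- a first-match scan over the list equals the first-match scan over its indices
lemma find?_range (p : String → Bool) (ll : List String) :
    ll.find? p =
      (((List.range ll.length).find? (fun i => p (pvGetL ll i))).map (pvGetL ll)) := by
  induction ll with
  | nil => rfl
  | cons x xs ih =>
    rw [List.length_cons, List.range_succ_eq_map, List.find?_cons]
    have h0 : pvGetL (x :: xs) 0 = x := by simp [pvGetL]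
    by_cases hp : p x
    · simp [h0, hp]
    · simp only [List.find?_cons, h0, hp, ih, List.find?_map]
      rw [Option.map_map]
      congr 1
      · ext i; simp [Function.comp, pvGetL_cons_succ]
      · ext i; simp [Function.comp, pvGetL_cons_succ]

-- characterization of find? over a range: first index satisfying q
lemma find?_range_some {q : Nat → Bool} {n i0 : Nat}
    (h : (List.range n).find? q = some i0) :
    i0 < n ∧ q i0 = true ∧ ∀ j < i0, q j = false := by
  obtain ⟨hq, i, hi, hgi, hbef⟩ := List.find?_eq_some_iff_getElem.mp h
  rw [List.getElem_range] at hgi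
  subst hgi
  refine ⟨by simpa using hi, hq, ?_⟩
  intro j hj
  have hb := hbef j hj
  rw [List.getElem_range] at hb
  simpa using hb

lemma find?_range_none {q : Nat → Bool} {n : Nat}
    (h : (List.range n).find? q = none) : ∀ j < n, q j = false := by
  intro j hj
  have := List.find?_eq_none.mp h j (List.mem_range.mpr hj)
  revert this; cases q j <;> simp

-- decoding Python's lexicographic tuple comparison
lemma pvTupLt_iff (a b c d : Nat) : pvTupLt (a, b) (c, d) = true ↔ (a < c ∨ (a = c ∧ b < d)) := by
  simp [pvTupLt]

-- B's min over (rank, index) keys picks the least index attaining the minimal rank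
lemma pvMinIdx_spec (r : Nat → Nat) (n : Nat) (hn : 0 < n) :
    ∃ i, pvMinIdx (fun i => (r i, i)) (List.range n) = some i ∧ i < n ∧
      (∀ j < n, r i ≤ r j) ∧ (∀ j < i, r i < r j) := by
  induction n with
  | zero => omega
  | succ m ih =>
    by_cases hm : 0 < m
    · obtain ⟨i, hfold, hlt, hmin, hfirst⟩ := ih hm
      rw [List.range_succ]
      unfold pvMinIdx at hfold ⊢
      rw [List.foldl_append, hfold]
      simp only [List.foldl_cons, List.foldl_nil]
      by_cases hc : pvTupLt (r m, m) (r i, i) = true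
      · have hrm : r m < r i := by
          have := (pvTupLt_iff _ _ _ _).mp hc
          omega
        refine ⟨m, by simp [hc], by omega, ?_, ?_⟩
        · intro j hj
          rcases Nat.lt_succ_iff_lt_or_eq.mp hj with hj' | hj'
          · exact le_of_lt (lt_of_lt_of_le hrm (hmin j hj'))
          · rw [hj']
        · intro j hj
          exact lt_of_lt_of_le hrm (hmin j hj)
      · have hge : r i ≤ r m := by
          have : ¬ (r m < r i ∨ (r m = r i ∧ m < i)) := fun hh => hc ((pvTupLt_iff _ _ _ _).mpr hh)
          omega
        refine ⟨i, by simp [hc], by omega, ?_, hfirst⟩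
        intro j hj
        rcases Nat.lt_succ_iff_lt_or_eq.mp hj with hj' | hj'
        · exact hmin j hj'
        · rw [hj']; exact hge
    · have hm0 : m = 0 := by omega
      subst hm0
      refine ⟨0, by simp [pvMinIdx, List.range_succ], by omega, ?_, by omega⟩
      intro j hj
      have : j = 0 := by omega
      subst this
      exact le_refl _

-- rank facts
lemma pvRank_eq_zero_iff (t ft lab : String) :
    pvRank t ft lab = 0 ↔ PySem.Str.lower lab = t := by
  unfold pvRank; split_ifs <;> simp_all

lemma pvRank_eq_one_iff (t ft lab : String) (h : ¬ PySem.Str.lower lab = t) :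
    pvRank t ft lab = 1 ↔ PySem.Str.isIn (PySem.Str.lower lab) t = true := by
  unfold pvRank; split_ifs <;> simp_all

lemma pvRank_eq_two_iff (t ft lab : String) (h : ¬ PySem.Str.lower lab = t)
    (h2 : ¬ PySem.Str.isIn (PySem.Str.lower lab) t = true) :
    pvRank t ft lab = 2 ↔ PySem.Str.startswith (PySem.Str.lower lab) ft = true := by
  unfold pvRank; split_ifs <;> simp_all

lemma pvRank_eq_three (t ft lab : String) (h : ¬ PySem.Str.lower lab = t)
    (h2 : ¬ PySem.Str.isIn (PySem.Str.lower lab) t = true)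
    (h3 : ¬ PySem.Str.startswith (PySem.Str.lower lab) ft = true) :
    pvRank t ft lab = 3 := by
  unfold pvRank; split_ifs <;> simp_all

-- ===== VERDICT (by name: the statement is the Claim_ definition above) =====
theorem extract_label_from_output_spec : Claim_equal_extract_label_from_output := by
  intro output_text label_list _ hpre
  unfold Spec_extract_label_from_output extract_label_from_output extract_label_from_output_alt
  set t := PySem.Str.lower (PySem.Str.strip output_text) with ht
  set ft := (PySem.Str.split₀ t).headD "" with hft
  set n := label_list.length with hn
  have hn0 : 0 < n := by
    rcases hpre with ⟨hne, -⟩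
    cases label_list with
    | nil => exact absurd rfl hne
    | cons _ _ => simp [hn]
  obtain ⟨i, hfold, hilt, hmin, hfirst⟩ :=
    pvMinIdx_spec (fun i => pvRank t ft (pvGetL label_list i)) n hn0
  rw [hfold]
  -- case on A's three scans
  rw [pvA_exact_eq, find?_range (fun l => decide (t = PySem.Str.lower l)) label_list, ← hn]
  cases hE : (List.range n).find? (fun j => decide (t = PySem.Str.lower (pvGetL label_list j))) with
  | some i0 =>
    obtain ⟨hi0n, hqi0, hbef⟩ := find?_range_some hE
    have hri0 : pvRank t ft (pvGetL label_list i0) = 0 := by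
      rw [pvRank_eq_zero_iff]
      simpa [eq_comm] using hqi0
    have hri : pvRank t ft (pvGetL label_list i) = 0 :=
      Nat.le_zero.mp (hri0 ▸ hmin i0 hi0n)
    have hii : i = i0 := by
      rcases lt_trichotomy i i0 with h | h | h
      · have hb := hbef i h
        rw [pvRank_eq_zero_iff] at hri
        simp [← hri] at hb
      · exact h
      · have := hfirst i0 h; omega
    subst hii
    simp [hri0]
  | none =>
    have hnoE : ∀ j < n, ¬ (PySem.Str.lower (pvGetL label_list j) = t) := by
      intro j hj
      have := find?_range_none hE j hj
      simpa [eq_comm] using this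
    have hge1 : ∀ j < n, 1 ≤ pvRank t ft (pvGetL label_list j) := by
      intro j hj
      have : pvRank t ft (pvGetL label_list j) ≠ 0 := by
        rw [Ne, pvRank_eq_zero_iff]; exact hnoE j hj
      omega
    rw [Option.map_none]
    rw [pvA_sub_eq, find?_range (fun l => PySem.Str.isIn (PySem.Str.lower l) t) label_list, ← hn]
    cases hS : (List.range n).find? (fun j => PySem.Str.isIn (PySem.Str.lower (pvGetL label_list j)) t) with
    | some i1 =>
      obtain ⟨hi1n, hqi1, hbef⟩ := find?_range_some hS
      have hri1 : pvRank t ft (pvGetL label_list i1) = 1 := by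
        rw [pvRank_eq_one_iff _ _ _ (hnoE i1 hi1n)]; exact hqi1
      have hri : pvRank t ft (pvGetL label_list i) = 1 := by
        have h1 := hmin i1 hi1n
        have h2 := hge1 i hilt
        omega
      have hii : i = i1 := by
        rcases lt_trichotomy i i1 with h | h | h
        · have hb := hbef i h
          rw [pvRank_eq_one_iff _ _ _ (hnoE i hilt)] at hri
          rw [hri] at hb; cases hb
        · exact h
        · have := hfirst i1 h; omega
      subst hii
      simp [hri1]
    | none =>
      have hnoS : ∀ j < n, ¬ (PySem.Str.isIn (PySem.Str.lower (pvGetL label_list j)) t = true) := by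
        intro j hj
        have hx := find?_range_none hS j hj
        rw [hx]
        exact Bool.false_ne_true
      have hge2 : ∀ j < n, 2 ≤ pvRank t ft (pvGetL label_list j) := by
        intro j hj
        have h1 : pvRank t ft (pvGetL label_list j) ≠ 0 := by
          rw [Ne, pvRank_eq_zero_iff]; exact hnoE j hj
        have h2 : pvRank t ft (pvGetL label_list j) ≠ 1 := by
          rw [Ne, pvRank_eq_one_iff _ _ _ (hnoE j hj)]; exact hnoS j hj
        omega
      rw [Option.map_none]
      rw [pvA_pref_eq, find?_range (fun l => PySem.Str.startswith (PySem.Str.lower l) ft) label_list, ← hn]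
      cases hP : (List.range n).find? (fun j => PySem.Str.startswith (PySem.Str.lower (pvGetL label_list j)) ft) with
      | some i2 =>
        obtain ⟨hi2n, hqi2, hbef⟩ := find?_range_some hP
        have hri2 : pvRank t ft (pvGetL label_list i2) = 2 := by
          rw [pvRank_eq_two_iff _ _ _ (hnoE i2 hi2n) (hnoS i2 hi2n)]; exact hqi2
        have hri : pvRank t ft (pvGetL label_list i) = 2 := by
          have h1 := hmin i2 hi2n
          have h2 := hge2 i hilt
          omega
        have hii : i = i2 := by
          rcases lt_trichotomy i i2 with h | h | h
          · have hb := hbef i h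
            rw [pvRank_eq_two_iff _ _ _ (hnoE i hilt) (hnoS i hilt)] at hri
            rw [hri] at hb; cases hb
          · exact h
          · have := hfirst i2 h; omega
        subst hii
        simp [hri2]
      | none =>
        have hnoP : ∀ j < n, ¬ (PySem.Str.startswith (PySem.Str.lower (pvGetL label_list j)) ft = true) := by
          intro j hj
          have hx := find?_range_none hP j hj
          rw [hx]
          exact Bool.false_ne_true
        have hri : pvRank t ft (pvGetL label_list i) = 3 :=
          pvRank_eq_three _ _ _ (hnoE i hilt) (hnoS i hilt) (hnoP i hilt)
        rw [Option.map_none]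
        have hri' : pvRank t ft (label_list[i]?.getD "") = 3 := by
          simpa [pvGetL] using hri
        simp [pvGetL, hri']
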